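-- pv_equiv track=rewrite | github.com/kshubham090/Chakra47-AgenticSwarm | community_agents/battlecard/agents/tech_stack.py | _infer_strategy
-- ===== SOURCE A (Python) =====
-- def _infer_strategy(marketing_tools: list[str]) -> list[str]:
--     signals = []
--     if any("Ads" in t or "Pixel" in t for t in marketing_tools):
--         signals.append("Paid advertising")
--     if any(t in marketing_tools for t in ["HubSpot Marketing", "Marketo", "Pardot", "ActiveCampaign"]):
--         signals.append("Marketing automation / inbound")
--     if any(t in marketing_tools for t in ["Segment", "Mixpanel", "Amplitude", "Heap", "PostHog"]):
--         signals.append("Product-led growth / analytics-heavy")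
--     if any(t in marketing_tools for t in ["Hotjar", "FullStory"]):
--         signals.append("CRO / UX optimization")
--     if "Klaviyo" in marketing_tools:
--         signals.append("Email marketing")
--     return signals
-- ===== SOURCE B (Python) =====
-- _CATEGORY = {
--     "HubSpot Marketing": "Marketing automation / inbound",
--     "Marketo": "Marketing automation / inbound",
--     "Pardot": "Marketing automation / inbound",
--     "ActiveCampaign": "Marketing automation / inbound",
--     "Segment": "Product-led growth / analytics-heavy",
--     "Mixpanel": "Product-led growth / analytics-heavy",
--     "Amplitude": "Product-led growth / analytics-heavy",
--     "Heap": "Product-led growth / analytics-heavy",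
--     "PostHog": "Product-led growth / analytics-heavy",
--     "Hotjar": "CRO / UX optimization",
--     "FullStory": "CRO / UX optimization",
--     "Klaviyo": "Email marketing",
-- }
--
-- _ORDER = [
--     "Paid advertising",
--     "Marketing automation / inbound",
--     "Product-led growth / analytics-heavy",
--     "CRO / UX optimization",
--     "Email marketing",
-- ]
--
-- def _infer_strategy(marketing_tools: list[str]) -> list[str]:
--     matched = set()
--     for tool in marketing_tools:
--         if "Ads" in tool or "Pixel" in tool:
--             matched.add("Paid advertising")
--         label = _CATEGORY.get(tool)
--         if label is not None:
--             matched.add(label)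
--     return [label for label in _ORDER if label in matched]
-- ===== Notes on version B (the rewrite author's own statement) =====
-- stated objective: faster
-- what changed: Replaces the five per-label any() scans over the tool list with one pass that classifies each tool via a precomputed name->label dict into a matched set, then emits the fixed-order labels found.
import Mathlib
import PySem

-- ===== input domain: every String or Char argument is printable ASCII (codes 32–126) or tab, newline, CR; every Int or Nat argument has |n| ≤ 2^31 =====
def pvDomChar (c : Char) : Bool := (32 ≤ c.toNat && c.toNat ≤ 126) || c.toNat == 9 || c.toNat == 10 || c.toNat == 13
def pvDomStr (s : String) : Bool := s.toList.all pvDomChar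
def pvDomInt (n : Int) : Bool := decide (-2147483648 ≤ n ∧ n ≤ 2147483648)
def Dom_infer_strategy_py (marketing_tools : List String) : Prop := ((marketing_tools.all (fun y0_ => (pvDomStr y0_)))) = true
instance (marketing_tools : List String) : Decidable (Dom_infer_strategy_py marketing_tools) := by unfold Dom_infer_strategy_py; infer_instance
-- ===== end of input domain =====

-- B replaces A's five per-label scans of the tool list by one pass that classifies each
-- tool through a precomputed name→label dict into a matched set, then emits the fixed-order labels found.

-- ===== PORT A =====
def infer_strategy_py (marketing_tools : List String) : List String :=
  let signals : List String := []
  let signals := if marketing_tools.any (fun t => PySem.Str.isIn "Ads" t || PySem.Str.isIn "Pixel" t)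
    then signals ++ ["Paid advertising"] else signals
  let signals := if (["HubSpot Marketing", "Marketo", "Pardot", "ActiveCampaign"] : List String).any
      (fun t => marketing_tools.contains t)
    then signals ++ ["Marketing automation / inbound"] else signals
  let signals := if (["Segment", "Mixpanel", "Amplitude", "Heap", "PostHog"] : List String).any
      (fun t => marketing_tools.contains t)
    then signals ++ ["Product-led growth / analytics-heavy"] else signals
  let signals := if (["Hotjar", "FullStory"] : List String).any (fun t => marketing_tools.contains t)
    then signals ++ ["CRO / UX optimization"] else signals
  let signals := if marketing_tools.contains "Klaviyo" then signals ++ ["Email marketing"] else signals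
  signals

-- ===== PORT B =====
def pvCategory : PySem.Dict String String := PySem.Dict.ofList
  [ ("HubSpot Marketing", "Marketing automation / inbound"),
    ("Marketo", "Marketing automation / inbound"),
    ("Pardot", "Marketing automation / inbound"),
    ("ActiveCampaign", "Marketing automation / inbound"),
    ("Segment", "Product-led growth / analytics-heavy"),
    ("Mixpanel", "Product-led growth / analytics-heavy"),
    ("Amplitude", "Product-led growth / analytics-heavy"),
    ("Heap", "Product-led growth / analytics-heavy"),
    ("PostHog", "Product-led growth / analytics-heavy"),
    ("Hotjar", "CRO / UX optimization"),
    ("FullStory", "CRO / UX optimization"),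
    ("Klaviyo", "Email marketing") ]

def pvOrder : List String :=
  [ "Paid advertising", "Marketing automation / inbound",
    "Product-led growth / analytics-heavy", "CRO / UX optimization", "Email marketing" ]

def pvStep (m : PySem.Set String) (tool : String) : PySem.Set String :=
  let m := if PySem.Str.isIn "Ads" tool || PySem.Str.isIn "Pixel" tool
    then PySem.Set.add m "Paid advertising" else m
  match pvCategory.get? tool with
  | some label => PySem.Set.add m label
  | none => m

def infer_strategy_py_alt (marketing_tools : List String) : List String :=
  let matched := marketing_tools.foldl pvStep PySem.Set.empty
  pvOrder.filter (fun label => PySem.Set.contains matched label)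

-- ===== PRECONDITION & SPEC =====
def Spec_infer_strategy_py (marketing_tools : List String) (out : List String) : Prop := out = infer_strategy_py_alt marketing_tools
instance (marketing_tools : List String) (out : List String) : Decidable (Spec_infer_strategy_py marketing_tools out) := by unfold Spec_infer_strategy_py; infer_instance

-- ===== CLAIM (what is proved, stated in full; the proofs are below) =====
def Claim_equal_infer_strategy_py : Prop := ∀ (marketing_tools : List String), Dom_infer_strategy_py marketing_tools → Spec_infer_strategy_py marketing_tools (infer_strategy_py marketing_tools)

-- ===== LEMMAS AND PROOFS =====

-- proof-only: the dict keys carrying each label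
def pvKeysOf (L : String) : List String :=
  if L = "Marketing automation / inbound" then ["HubSpot Marketing", "Marketo", "Pardot", "ActiveCampaign"]
  else if L = "Product-led growth / analytics-heavy" then ["Segment", "Mixpanel", "Amplitude", "Heap", "PostHog"]
  else if L = "CRO / UX optimization" then ["Hotjar", "FullStory"]
  else if L = "Email marketing" then ["Klaviyo"]
  else []

lemma mem_pvStep (m : PySem.Set String) (t x : String) :
    x ∈ pvStep m t ↔ x ∈ m ∨
      ((PySem.Str.isIn "Ads" t || PySem.Str.isIn "Pixel" t) = true ∧ x = "Paid advertising") ∨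
      pvCategory.get? t = some x := by
  unfold pvStep
  cases hc : pvCategory.get? t <;>
    split_ifs with ha <;>
      simp only [ha, PySem.Set.mem_add, Option.some.injEq, eq_comm] <;>
        tauto

lemma mem_foldl_pvStep (tools : List String) (m : PySem.Set String) (x : String) :
    x ∈ tools.foldl pvStep m ↔ x ∈ m ∨
      ∃ t ∈ tools,
        (((PySem.Str.isIn "Ads" t || PySem.Str.isIn "Pixel" t) = true ∧ x = "Paid advertising") ∨
          pvCategory.get? t = some x) := by
  induction tools generalizing m with
  | nil => simp
  | cons a ts ih =>
      simp only [List.foldl_cons, ih, mem_pvStep, List.mem_cons]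
      constructor
      · rintro ((h | h) | ⟨t, ht, hp⟩)
        · exact Or.inl h
        · exact Or.inr ⟨a, Or.inl rfl, h⟩
        · exact Or.inr ⟨t, Or.inr ht, hp⟩
      · rintro (h | ⟨t, (rfl | ht), hp⟩)
        · exact Or.inl (Or.inl h)
        · exact Or.inl (Or.inr hp)
        · exact Or.inr ⟨t, ht, hp⟩

lemma pv_nodup : pvCategory.keys.Nodup := by decide

lemma get?_pvCategory_iff (t v : String) : pvCategory.get? t = some v ↔ (t, v) ∈
    [ ("HubSpot Marketing", "Marketing automation / inbound"),
      ("Marketo", "Marketing automation / inbound"),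
      ("Pardot", "Marketing automation / inbound"),
      ("ActiveCampaign", "Marketing automation / inbound"),
      ("Segment", "Product-led growth / analytics-heavy"),
      ("Mixpanel", "Product-led growth / analytics-heavy"),
      ("Amplitude", "Product-led growth / analytics-heavy"),
      ("Heap", "Product-led growth / analytics-heavy"),
      ("PostHog", "Product-led growth / analytics-heavy"),
      ("Hotjar", "CRO / UX optimization"),
      ("FullStory", "CRO / UX optimization"),
      ("Klaviyo", "Email marketing") ] := by
  rw [PySem.Dict.get?_eq_some_iff_mem_items pvCategory t v pv_nodup]
  rfl

-- ===== VERDICT (by name: the statement is the Claim_ definition above) =====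
set_option maxHeartbeats 1000000 in
theorem infer_strategy_py_spec : Claim_equal_infer_strategy_py := by
  intro tools _
  unfold Spec_infer_strategy_py infer_strategy_py infer_strategy_py_alt
  have hm : ∀ x, PySem.Set.contains (tools.foldl pvStep PySem.Set.empty) x = true ↔
      ∃ t ∈ tools,
        (((PySem.Str.isIn "Ads" t || PySem.Str.isIn "Pixel" t) = true ∧ x = "Paid advertising") ∨
          pvCategory.get? t = some x) := by
    intro x
    rw [PySem.Set.contains_iff, mem_foldl_pvStep]
    simp only [PySem.Set.empty, List.not_mem_nil, false_or]
  have h1 : PySem.Set.contains (tools.foldl pvStep PySem.Set.empty) "Paid advertising"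
      = tools.any (fun t => PySem.Str.isIn "Ads" t || PySem.Str.isIn "Pixel" t) := by
    rw [Bool.eq_iff_iff, hm, List.any_eq_true]
    constructor
    · rintro ⟨t, ht, h | h⟩
      · exact ⟨t, ht, h.1⟩
      · rw [get?_pvCategory_iff] at h
        simp only [List.mem_cons, List.not_mem_nil, or_false, Prod.mk.injEq] at h
        simp at h
    · rintro ⟨t, ht, h⟩; exact ⟨t, ht, Or.inl ⟨h, rfl⟩⟩
  have key : ∀ (L : String) (ks : List String), L ≠ "Paid advertising" →
      (∀ t, pvCategory.get? t = some L → t ∈ ks) →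
      (∀ t ∈ ks, pvCategory.get? t = some L) →
      (PySem.Set.contains (tools.foldl pvStep PySem.Set.empty) L
        = ks.any (fun t => tools.contains t)) := by
    intro L ks hne hfwd hbwd
    rw [Bool.eq_iff_iff, hm, List.any_eq_true]
    constructor
    · rintro ⟨t, ht, h | h⟩
      · exact absurd h.2 hne
      · exact ⟨t, hfwd t h, by rw [List.contains_iff_mem]; exact ht⟩
    · rintro ⟨t, htk, h⟩
      exact ⟨t, by rw [List.contains_iff_mem] at h; exact h, Or.inr (hbwd t htk)⟩
  have h2 := key "Marketing automation / inbound"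
      ["HubSpot Marketing", "Marketo", "Pardot", "ActiveCampaign"] (by decide)
    (by intro t h; rw [get?_pvCategory_iff] at h
        simp only [List.mem_cons, List.not_mem_nil, or_false, Prod.mk.injEq] at h
        simp only [List.mem_cons, List.not_mem_nil, or_false]
        simp at h; tauto)
    (by intro t ht; fin_cases ht <;> decide)
  have h3 := key "Product-led growth / analytics-heavy"
      ["Segment", "Mixpanel", "Amplitude", "Heap", "PostHog"] (by decide)
    (by intro t h; rw [get?_pvCategory_iff] at h
        simp only [List.mem_cons, List.not_mem_nil, or_false, Prod.mk.injEq] at h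
        simp only [List.mem_cons, List.not_mem_nil, or_false]
        simp at h; tauto)
    (by intro t ht; fin_cases ht <;> decide)
  have h4 := key "CRO / UX optimization" ["Hotjar", "FullStory"] (by decide)
    (by intro t h; rw [get?_pvCategory_iff] at h
        simp only [List.mem_cons, List.not_mem_nil, or_false, Prod.mk.injEq] at h
        simp only [List.mem_cons, List.not_mem_nil, or_false]
        simp at h; tauto)
    (by intro t ht; fin_cases ht <;> decide)
  have h5 := key "Email marketing" ["Klaviyo"] (by decide)
    (by intro t h; rw [get?_pvCategory_iff] at h
        simp only [List.mem_cons, List.not_mem_nil, or_false, Prod.mk.injEq] at h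
        simp only [List.mem_cons, List.not_mem_nil, or_false]
        simp at h; tauto)
    (by intro t ht; fin_cases ht; decide)
  have h5' : PySem.Set.contains (tools.foldl pvStep PySem.Set.empty) "Email marketing"
      = tools.contains "Klaviyo" := by
    rw [h5]; simp [List.any_cons, List.any_nil]
  clear hm key h5
  simp only [pvOrder, List.filter_cons, List.filter_nil, h1, h2, h3, h4, h5']
  split_ifs <;> rfl
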